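-- pv_equiv track=rewrite | github.com/Devanshe15/DSA-practice | Day 29/diagonal.py | find_diagonal_numbers
-- ===== SOURCE A (Python) =====
-- def find_diagonal_numbers(matrix, queries):
--     diagonal_numbers = []
--     n = len(matrix)
--
--     for query in queries:
--         x = query
--         found = False
--         for i in range(n):
--             for j in range(n):
--                 if matrix[i][j] == x:
--                     diagonal_numbers.append(i + j + 1)
--                     found = True
--                     break
--             if found:
--                 break
--         if not found:
--             diagonal_numbers.append(-1)
--
--     return diagonal_numbers
-- ===== SOURCE B (Python) =====
-- def find_diagonal_numbers(matrix, queries):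
--     n = len(matrix)
--     first = {}
--     for i, row in enumerate(matrix):
--         for j, v in enumerate(row[:n]):
--             if v not in first:
--                 first[v] = i + j + 1
--     return [first.get(q, -1) for q in queries]
-- ===== Notes on version B (the rewrite author's own statement) =====
-- stated objective: faster
-- what changed: Instead of rescanning the matrix's n-by-n part with nested loops for every query, B makes one row-major pass building a value-to-first-diagonal-index dict and answers each query with an O(1) lookup.
-- outside the precondition, e.g. on find_diagonal_numbers([[1], [2]], [1]): A returns [1], B returns [1]
import Mathlib
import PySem

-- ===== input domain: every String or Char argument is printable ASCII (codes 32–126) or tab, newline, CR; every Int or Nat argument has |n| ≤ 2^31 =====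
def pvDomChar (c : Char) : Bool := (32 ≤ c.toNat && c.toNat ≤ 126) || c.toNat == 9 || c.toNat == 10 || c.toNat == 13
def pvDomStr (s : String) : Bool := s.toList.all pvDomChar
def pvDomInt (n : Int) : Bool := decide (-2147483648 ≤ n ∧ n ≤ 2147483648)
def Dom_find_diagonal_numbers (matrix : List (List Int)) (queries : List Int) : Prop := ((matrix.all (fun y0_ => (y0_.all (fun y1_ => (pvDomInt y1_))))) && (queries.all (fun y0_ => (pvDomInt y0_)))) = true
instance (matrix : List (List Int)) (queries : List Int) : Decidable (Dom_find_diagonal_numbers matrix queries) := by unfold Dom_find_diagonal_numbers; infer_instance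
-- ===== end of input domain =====

-- B replaces A's per-query nested rescans of the n×n part by one row-major pass building a
-- value → first-diagonal-index dict, then an O(1) lookup per query (objective: faster).

-- ===== PORT A =====
-- A's nested 'for i … for j … break' search for one query: an Option accumulator,
-- 'some d' = found-so-break, mirroring A's found flag and branch order.
def pvASearch (matrix : List (List Int)) (n : Int) (x : Int) : Option Int :=
  (PySem.List.pyRange 0 n 1).foldl (fun found i =>
    if found.isSome then found
    else
      (PySem.List.pyRange 0 n 1).foldl (fun f j =>
        if f.isSome then f
        else if PySem.List.pyGetD (PySem.List.pyGetD matrix i []) j 0 = x then some (i + j + 1)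
        else none) none) none

def find_diagonal_numbers (matrix : List (List Int)) (queries : List Int) : List Int :=
  let n : Int := matrix.length
  queries.foldl (fun diagonal_numbers query =>
    match pvASearch matrix n query with
    | some d => diagonal_numbers ++ [d]
    | none => diagonal_numbers ++ [-1]) []

-- ===== PORT B =====
def pvBFirst (matrix : List (List Int)) : PySem.Dict Int Int :=
  (PySem.List.enumerate matrix 0).foldl (fun first p =>
    (PySem.List.enumerate (PySem.List.slice p.2 none (some (matrix.length : Int))) 0).foldl
      (fun first q =>
        if first.contains q.2 then first else first.insert q.2 (p.1 + q.1 + 1)) first)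
    PySem.Dict.empty

def find_diagonal_numbers_alt (matrix : List (List Int)) (queries : List Int) : List Int :=
  let first := pvBFirst matrix
  queries.map (fun q => first.getD q (-1))

-- ===== PRECONDITION & SPEC =====
-- Pre_ requires every row to have at least len(matrix) entries: A's fixed column bound
-- j < len(matrix) raises IndexError at the end of a too-short row whenever some query is not
-- found before that hole (and when every query is found earlier, A returns and B agrees anyway).
def Pre_find_diagonal_numbers (matrix : List (List Int)) (queries : List Int) : Prop :=
  ∀ row ∈ matrix, matrix.length ≤ row.length
instance (matrix : List (List Int)) (queries : List Int) : Decidable (Pre_find_diagonal_numbers matrix queries) := by unfold Pre_find_diagonal_numbers; infer_instance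

def pvWitness_find_diagonal_numbers : List (List Int) × List Int :=
  ([[3, 1], [4, 1, 7]], [1, 5, 4])

def Spec_find_diagonal_numbers (matrix : List (List Int)) (queries : List Int) (out : List Int) : Prop := out = find_diagonal_numbers_alt matrix queries
instance (matrix : List (List Int)) (queries : List Int) (out : List Int) : Decidable (Spec_find_diagonal_numbers matrix queries out) := by unfold Spec_find_diagonal_numbers; infer_instance

-- ===== CLAIM (what is proved, stated in full; the proofs are below) =====
def Claim_equal_find_diagonal_numbers : Prop := ∀ (matrix : List (List Int)) (queries : List Int), Dom_find_diagonal_numbers matrix queries → Pre_find_diagonal_numbers matrix queries → Spec_find_diagonal_numbers matrix queries (find_diagonal_numbers matrix queries)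

-- ===== LEMMAS AND PROOFS =====

-- A first-match ("break") Option foldl is findSome?.
theorem pv_foldl_break {α β : Type} (l : List α) (f : α → Option β) (a : Option β) :
    l.foldl (fun acc x => if acc.isSome then acc else f x) a
      = if a.isSome then a else l.findSome? f := by
  induction l generalizing a with
  | nil => cases a <;> simp
  | cons x xs ih =>
    cases a with
    | some r => simp [List.foldl_cons, ih]
    | none =>
      simp only [List.foldl_cons, List.findSome?_cons, Option.isSome_none, Bool.false_eq_true,
        ite_false]
      cases h : f x <;> simp [ih]

-- findSome? only depends on the function's values on the list.
theorem pv_findSome?_congr {α β : Type} (l : List α) (f g : α → Option β)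
    (h : ∀ x ∈ l, f x = g x) : l.findSome? f = l.findSome? g := by
  induction l with
  | nil => rfl
  | cons x xs ih =>
    simp only [List.findSome?_cons, h x (List.mem_cons_self)]
    cases g x with
    | some r => rfl
    | none => exact ih (fun y hy => h y (List.mem_cons_of_mem _ hy))

-- B's per-row build: lookups in the dict after folding one enumerated row.
theorem pvB_row (row : List Int) (i j0 : Int) (d : PySem.Dict Int Int) (q : Int) :
    ((PySem.List.enumerate row j0).foldl (fun d p =>
        if d.contains p.2 then d else d.insert p.2 (i + p.1 + 1)) d).get? q
      = match d.get? q with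
        | some v => some v
        | none => (PySem.List.enumerate row j0).findSome?
            (fun p => if p.2 = q then some (i + p.1 + 1) else none) := by
  induction row generalizing j0 d with
  | nil => cases h : d.get? q <;> simp [PySem.List.enumerate, h]
  | cons v rest ih =>
    rw [PySem.List.enumerate_cons]
    simp only [List.foldl_cons, List.findSome?_cons]
    by_cases hc : d.contains v
    · rw [if_pos hc, ih]
      have hs : (d.get? v).isSome := by
        rw [PySem.Dict.contains_eq_isSome_get?] at hc; exact hc
      cases hq : d.get? q with
      | some w => simp
      | none =>
        have hne : v ≠ q := by
          intro he; rw [he, hq] at hs; simp at hs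
        simp [hne]
    · rw [if_neg hc, ih]
      have hn : d.get? v = none := by
        rw [PySem.Dict.contains_eq_isSome_get?] at hc
        simpa using hc
      by_cases he : v = q
      · subst he
        rw [PySem.Dict.get?_insert_self, hn]
        simp
      · rw [PySem.Dict.get?_insert_of_ne _ _ (Ne.symm he)]
        cases hq : d.get? q <;> simp [he]

-- B's whole build: lookups in pvBFirst's fold, for any row preprocessing g, start dict, offset.
theorem pvB_build (rows : List (List Int)) (g : List Int → List Int) (i0 : Int)
    (d : PySem.Dict Int Int) (q : Int) :
    ((PySem.List.enumerate rows i0).foldl (fun first p =>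
        (PySem.List.enumerate (g p.2) 0).foldl (fun first r =>
          if first.contains r.2 then first else first.insert r.2 (p.1 + r.1 + 1)) first) d).get? q
      = match d.get? q with
        | some v => some v
        | none => (PySem.List.enumerate rows i0).findSome?
            (fun p => (PySem.List.enumerate (g p.2) 0).findSome?
              (fun r => if r.2 = q then some (p.1 + r.1 + 1) else none)) := by
  induction rows generalizing i0 d with
  | nil => cases h : d.get? q <;> simp [PySem.List.enumerate, h]
  | cons row rest ih =>
    rw [PySem.List.enumerate_cons]
    simp only [List.foldl_cons, List.findSome?_cons]
    rw [ih, pvB_row]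
    cases hq : d.get? q with
    | some w => simp
    | none =>
      cases hr : (PySem.List.enumerate (g row) 0).findSome?
          (fun r => if r.2 = q then some (i0 + r.1 + 1) else none) <;> simp

-- A's inner scan of one row, loop bound = the row's exact length.
theorem pvA_row_exact (row : List Int) (n : Nat) (hlen : row.length = n) (i x : Int) :
    (PySem.List.pyRange 0 (n : Int) 1).foldl (fun f j =>
        if f.isSome then f
        else if PySem.List.pyGetD row j 0 = x then some (i + j + 1) else none) none
      = (PySem.List.enumerate row 0).findSome?
          (fun q => if q.2 = x then some (i + q.1 + 1) else none) := by
  subst hlen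
  rw [pv_foldl_break (PySem.List.pyRange 0 (row.length : Int) 1)
    (fun j => if PySem.List.pyGetD row j 0 = x then some (i + j + 1) else none) none]
  rw [PySem.List.enumerate_eq_map_pyRange row (0 : Int), List.findSome?_map]
  rfl

-- A's inner scan with loop bound n ≤ the row's length only sees the row's first n entries.
theorem pvA_row_take (row : List Int) (n : Nat) (hn : n ≤ row.length) (i x : Int) :
    (PySem.List.pyRange 0 (n : Int) 1).foldl (fun f j =>
        if f.isSome then f
        else if PySem.List.pyGetD row j 0 = x then some (i + j + 1) else none) none
      = (PySem.List.enumerate (row.take n) 0).findSome?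
          (fun q => if q.2 = x then some (i + q.1 + 1) else none) := by
  have hlen : (row.take n).length = n := by simp [List.length_take]; omega
  have hstep : ∀ (f : Option Int), ∀ j ∈ PySem.List.pyRange 0 (n : Int) 1,
      (if f.isSome then f
        else if PySem.List.pyGetD row j 0 = x then some (i + j + 1) else none)
      = (if f.isSome then f
        else if PySem.List.pyGetD (row.take n) j 0 = x then some (i + j + 1) else none) := by
    intro f j hj
    have hj' : 0 ≤ j ∧ j < (n : Int) := (PySem.List.mem_pyRange_one).1 hj
    have hget : PySem.List.pyGetD row j 0 = PySem.List.pyGetD (row.take n) j 0 := by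
      rw [show j = ((j.toNat : Nat) : Int) from (Int.toNat_of_nonneg hj'.1).symm]
      rw [PySem.List.pyGetD_natCast, PySem.List.pyGetD_natCast]
      have hlt : j.toNat < n := by omega
      simp [List.getD_eq_getElem?_getD, hlt]
    rw [hget]
  exact (PySem.List.foldl_congr_mem _ _ _ _ (fun a b hb => hstep a b hb)).trans
    (pvA_row_exact (row.take n) n hlen i x)

-- Under Pre_, A's search equals the nested findSome? that pvB_build produces.
theorem pvA_search (matrix : List (List Int)) (x : Int)
    (hpre : ∀ row ∈ matrix, matrix.length ≤ row.length) :
    pvASearch matrix (matrix.length : Int) x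
      = (PySem.List.enumerate matrix 0).findSome?
          (fun p => (PySem.List.enumerate (p.2.take matrix.length) 0).findSome?
            (fun r => if r.2 = x then some (p.1 + r.1 + 1) else none)) := by
  unfold pvASearch
  rw [pv_foldl_break (PySem.List.pyRange 0 (matrix.length : Int) 1)
    (fun i => (PySem.List.pyRange 0 (matrix.length : Int) 1).foldl (fun f j =>
        if f.isSome then f
        else if PySem.List.pyGetD (PySem.List.pyGetD matrix i []) j 0 = x then some (i + j + 1)
        else none) none) none]
  rw [PySem.List.enumerate_eq_map_pyRange matrix ([] : List Int), List.findSome?_map]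
  simp only [Option.isSome_none, Bool.false_eq_true, ite_false]
  apply pv_findSome?_congr
  intro i hi
  have hi' : 0 ≤ i ∧ i < (matrix.length : Int) := (PySem.List.mem_pyRange_one).1 hi
  have hrowmem : PySem.List.pyGetD matrix i [] ∈ matrix := by
    apply PySem.List.pyGetD_mem
    exact ⟨by have h1 := hi'.1; omega, by exact_mod_cast hi'.2⟩
  have hlen : matrix.length ≤ (PySem.List.pyGetD matrix i []).length := hpre _ hrowmem
  simp only [Function.comp]
  exact pvA_row_take (PySem.List.pyGetD matrix i []) matrix.length hlen i x

-- A's appending output loop is a map.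
theorem pvA_out (matrix : List (List Int)) (n : Int) (qs : List Int) (acc : List Int) :
    qs.foldl (fun a q => match pvASearch matrix n q with
        | some d => a ++ [d]
        | none => a ++ [-1]) acc
      = acc ++ qs.map (fun q => match pvASearch matrix n q with
        | some d => d
        | none => (-1 : Int)) := by
  induction qs generalizing acc with
  | nil => simp
  | cons q qs ih =>
    simp only [List.foldl_cons, List.map_cons]
    cases h : pvASearch matrix n q <;> simp [ih]

-- ===== VERDICT (by name: the statement is the Claim_ definition above) =====
theorem find_diagonal_numbers_spec : Claim_equal_find_diagonal_numbers := by
  intro matrix queries _ hpre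
  unfold Spec_find_diagonal_numbers find_diagonal_numbers find_diagonal_numbers_alt
  simp only []
  rw [pvA_out]
  simp only [List.nil_append]
  apply List.map_congr_left
  intro q _
  have hb : (pvBFirst matrix).get? q
      = (PySem.List.enumerate matrix 0).findSome?
          (fun p => (PySem.List.enumerate (p.2.take matrix.length) 0).findSome?
            (fun r => if r.2 = q then some (p.1 + r.1 + 1) else none)) := by
    unfold pvBFirst
    rw [pvB_build matrix (fun r => PySem.List.slice r none (some (matrix.length : Int))) 0
      PySem.Dict.empty q]
    simp [PySem.Dict.get?_empty, PySem.List.slice_to_natCast]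
  rw [pvA_search matrix q hpre, PySem.Dict.getD_eq_get?_getD, hb]
  cases hF : (PySem.List.enumerate matrix 0).findSome?
      (fun p => (PySem.List.enumerate (p.2.take matrix.length) 0).findSome?
        (fun r => if r.2 = q then some (p.1 + r.1 + 1) else none)) <;> simp
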